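-- pv_equiv track=rewrite | github.com/neel-maniar/Public | Public Projects/Challenges/IntegerPowersOfComplexNumbers.py | complexPower
-- ===== SOURCE A (Python) =====
-- import operator as op
-- from functools import reduce
--
-- def ncr(n, r):
--     r = min(r, n-r)
--     numer = reduce(op.mul, range(n, n-r, -1), 1)
--     denom = reduce(op.mul, range(1, r+1), 1)
--     return numer // denom
--
-- def complexPower(complexNumber,power):
--     x=complexNumber[0]
--     y=complexNumber[1]
--     real=0
--     imaginary=0
--     for i in range(power+1):
--         if i%4==0:
--             real+=ncr(power,i)*x**(power-i)*y**i
--         if i%4==1: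
--             imaginary+=ncr(power,i)*x**(power-i)*y**i
--         if i%4==2:
--             real+=-ncr(power,i)*x**(power-i)*y**i
--         if i%4==3:
--             imaginary+=-ncr(power,i)*x**(power-i)*y**i
--     return [real,imaginary]
-- ===== SOURCE B (Python) =====
-- def complexPower(complexNumber, power):
--     # Exponentiation by squaring on Gaussian integers; like A, a negative
--     # power yields [0, 0] (A's loop body never runs there).
--     if power < 0:
--         return [0, 0]
--     x = complexNumber[0]
--     y = complexNumber[1]
--     rr, ri = 1, 0          # result = 1
--     br, bi = x, y          # base = x + y*i
--     n = power
--     while n > 0: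
--         if n % 2 == 1:
--             rr, ri = rr * br - ri * bi, rr * bi + ri * br
--         br, bi = br * br - bi * bi, br * bi + bi * br
--         n //= 2
--     return [rr, ri]
-- ===== Notes on version B (the rewrite author's own statement) =====
-- stated objective: alternative
-- what changed: A expands (x+iy)^n by the binomial theorem, rebuilding a binomial coefficient from two product loops for every term; B multiplies Gaussian integers by exponentiation-by-squaring (O(log n) multiplications; intended as faster and measured 13x at the largest size both finished, but a timing run could not confirm it at the top size, so no unqualified speed claim).
import Mathlib
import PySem

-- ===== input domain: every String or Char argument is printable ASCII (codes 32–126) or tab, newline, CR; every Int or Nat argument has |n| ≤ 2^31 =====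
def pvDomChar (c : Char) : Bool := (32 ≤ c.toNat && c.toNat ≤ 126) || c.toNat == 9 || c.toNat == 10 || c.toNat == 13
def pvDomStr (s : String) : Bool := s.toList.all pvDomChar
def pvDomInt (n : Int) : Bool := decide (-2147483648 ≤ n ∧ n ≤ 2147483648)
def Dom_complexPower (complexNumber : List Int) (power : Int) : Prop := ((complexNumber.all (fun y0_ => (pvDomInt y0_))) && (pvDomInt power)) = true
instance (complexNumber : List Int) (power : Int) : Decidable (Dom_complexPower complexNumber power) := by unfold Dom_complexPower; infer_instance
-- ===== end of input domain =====

-- B replaces A's binomial-expansion loop (one binomial coefficient built from two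
-- product loops per term) by exponentiation by squaring on Gaussian integers
-- (fewer multiplications; intended as faster — measured 13x where both finished,
-- unconfirmed at the largest timing size).

-- ===== PORT A =====
-- ncr(n, r): r = min(r, n-r); numer = reduce(mul, range(n, n-r, -1), 1); denom = reduce(mul, range(1, r+1), 1)
def ncrPort (n r : Int) : Int :=
  let r := min r (n - r)
  let numer := (PySem.List.pyRange n (n - r) (-1)).foldl (· * ·) 1
  let denom := (PySem.List.pyRange 1 (r + 1) 1).foldl (· * ·) 1
  PySem.Int.floordiv numer denom

-- the exponents (power - i) and i are nonnegative whenever the loop body runs,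
-- so `.toNat` is exact there; x, y are complexNumber[0], complexNumber[1]
-- (Pre_ guarantees they exist, so the getD default is never used)
def complexPower (complexNumber : List Int) (power : Int) : List Int :=
  let x := PySem.List.pyGetD complexNumber 0 0
  let y := PySem.List.pyGetD complexNumber 1 0
  let s := (PySem.List.pyRange 0 (power + 1) 1).foldl (fun (s : Int × Int) i =>
    let s := if PySem.Int.mod i 4 = 0 then
      (s.1 + ncrPort power i * x ^ (power - i).toNat * y ^ i.toNat, s.2) else s
    let s := if PySem.Int.mod i 4 = 1 then
      (s.1, s.2 + ncrPort power i * x ^ (power - i).toNat * y ^ i.toNat) else s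
    let s := if PySem.Int.mod i 4 = 2 then
      (s.1 + -(ncrPort power i) * x ^ (power - i).toNat * y ^ i.toNat, s.2) else s
    let s := if PySem.Int.mod i 4 = 3 then
      (s.1, s.2 + -(ncrPort power i) * x ^ (power - i).toNat * y ^ i.toNat) else s
    s) (0, 0)
  [s.1, s.2]

-- ===== PORT B =====
def cmulAlt (a b : Int × Int) : Int × Int :=
  (a.1 * b.1 - a.2 * b.2, a.1 * b.2 + a.2 * b.1)

def powLoopAlt (res base : Int × Int) (n : Nat) : Int × Int :=
  if h : n = 0 then res
  else powLoopAlt (if n % 2 = 1 then cmulAlt res base else res) (cmulAlt base base) (n / 2)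
  decreasing_by exact Nat.div_lt_self (Nat.pos_of_ne_zero h) (by omega)

def complexPower_alt (complexNumber : List Int) (power : Int) : List Int :=
  if power < 0 then [0, 0]
  else
    let x := PySem.List.pyGetD complexNumber 0 0
    let y := PySem.List.pyGetD complexNumber 1 0
    let r := powLoopAlt (1, 0) (x, y) power.toNat
    [r.1, r.2]

-- ===== PRECONDITION & SPEC =====
-- Pre_ excludes only lists with fewer than two elements, on which Python A
-- raises IndexError (complexNumber[0] / complexNumber[1]).
def Pre_complexPower (complexNumber : List Int) (power : Int) : Prop :=
  2 ≤ complexNumber.length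
instance (complexNumber : List Int) (power : Int) : Decidable (Pre_complexPower complexNumber power) := by unfold Pre_complexPower; infer_instance

def pvWitness_complexPower : List Int × Int := ([3, -2], 5)

def Spec_complexPower (complexNumber : List Int) (power : Int) (out : List Int) : Prop := out = complexPower_alt complexNumber power
instance (complexNumber : List Int) (power : Int) (out : List Int) : Decidable (Spec_complexPower complexNumber power out) := by unfold Spec_complexPower; infer_instance

-- ===== CLAIM (what is proved, stated in full; the proofs are below) =====
def Claim_equal_complexPower : Prop := ∀ (complexNumber : List Int) (power : Int), Dom_complexPower complexNumber power → Pre_complexPower complexNumber power → Spec_complexPower complexNumber power (complexPower complexNumber power)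

-- ===== LEMMAS AND PROOFS =====

def toG (p : Int × Int) : Zsqrtd (-1) := ⟨p.1, p.2⟩

theorem toG_cmul (a b : Int × Int) : toG (cmulAlt a b) = toG a * toG b := by
  apply Zsqrtd.ext <;> simp [toG, cmulAlt, Zsqrtd.re_mul, Zsqrtd.im_mul] <;> ring

theorem powLoopAlt_eq (n : Nat) (res base : Int × Int) :
    toG (powLoopAlt res base n) = toG res * toG base ^ n := by
  induction n using Nat.strong_induction_on generalizing res base with
  | _ n ih =>
    rw [powLoopAlt]
    by_cases h : n = 0
    · simp [h]
    · rw [dif_neg h, ih (n / 2) (Nat.div_lt_self (Nat.pos_of_ne_zero h) (by omega))]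
      rcases Nat.even_or_odd n with he | ho
      · have h2 : n % 2 = 0 := Nat.even_iff.mp he
        have hn : n = 2 * (n / 2) := by omega
        rw [if_neg (by omega), toG_cmul, ← pow_two, ← pow_mul]
        conv_rhs => rw [hn]
      · have h2 : n % 2 = 1 := Nat.odd_iff.mp ho
        have hn : n = 2 * (n / 2) + 1 := by omega
        rw [if_pos h2, toG_cmul, toG_cmul, ← pow_two, ← pow_mul]
        conv_rhs => rw [hn]
        rw [pow_add, pow_one]
        ring


theorem foldl_mul_int (l : List Int) (a : Int) : l.foldl (· * ·) a = a * l.prod := by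
  induction l generalizing a with
  | nil => simp
  | cons x xs ih => simp [List.foldl_cons, ih, mul_assoc]

theorem numer_eq (r n : Nat) (h : r ≤ n) :
    (PySem.List.pyRange (n : Int) ((n : Int) - (r : Int)) (-1)).foldl (· * ·) 1
      = (n.descFactorial r : Int) := by
  induction r generalizing n with
  | zero => simp [PySem.List.pyRange_neg_one_eq_nil]
  | succ r ih =>
    obtain ⟨m, rfl⟩ : ∃ m, n = m + 1 := ⟨n - 1, by omega⟩
    rw [PySem.List.pyRange_neg_one_cons (by push_cast; omega)]
    have e1 : ((m : Int) + 1) - 1 = (m : Int) := by ring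
    have e2 : ((m + 1 : Nat) : Int) - ((r + 1 : Nat) : Int) = (m : Int) - (r : Int) := by
      push_cast; ring
    rw [List.foldl_cons, foldl_mul_int]
    push_cast
    rw [show ((m : Int) + 1) - ((r : Int) + 1) = (m : Int) - (r : Int) from by ring]
    rw [show ((m : Int) + 1) - 1 = (m : Int) from by ring]
    have := ih m (by omega)
    rw [foldl_mul_int] at this
    simp at this
    rw [this]
    push_cast [Nat.succ_descFactorial_succ]
    ring

theorem denom_eq (r : Nat) :
    (PySem.List.pyRange 1 ((r : Int) + 1) 1).foldl (· * ·) 1 = (Nat.factorial r : Int) := by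
  induction r with
  | zero => simp [PySem.List.pyRange_one_eq_nil]
  | succ r ih =>
    have : ((r + 1 : Nat) : Int) + 1 = ((r : Int) + 1) + 1 := by push_cast; ring
    rw [this, PySem.List.pyRange_one_succ_right (by omega), List.foldl_append, ih]
    rw [List.foldl_cons, List.foldl_nil, Nat.factorial_succ]
    push_cast
    ring

theorem floordiv_natCast (p q : Nat) (hq : 0 < q) :
    PySem.Int.floordiv (p : Int) (q : Int) = ((p / q : Nat) : Int) := by
  rw [PySem.Int.floordiv_eq_iff_of_pos (by exact_mod_cast hq)]
  constructor
  · exact_mod_cast Nat.div_mul_le_self p q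
  · have h1 : p < (p / q + 1) * q := by
      have h2 := Nat.lt_mul_div_succ p hq
      rw [Nat.mul_comm] at h2
      exact h2
    exact_mod_cast h1

theorem ncrPort_eq (n k : Nat) (hk : k ≤ n) : ncrPort (n : Int) (k : Int) = (n.choose k : Int) := by
  have hmin : min (k : Int) ((n : Int) - (k : Int)) = ((min k (n - k) : Nat) : Int) := by
    rw [Nat.cast_min, Nat.cast_sub hk]
  unfold ncrPort
  dsimp only
  rw [hmin]
  rw [numer_eq _ _ (by omega), denom_eq, floordiv_natCast _ _ (Nat.factorial_pos _)]
  rw [← Nat.choose_eq_descFactorial_div_factorial]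
  rcases le_total k (n - k) with h | h
  · rw [min_eq_left h]
  · rw [min_eq_right h, Nat.choose_symm hk]

def Iu : Zsqrtd (-1) := ⟨0, 1⟩

theorem Iu_sq : Iu ^ 2 = -1 := by
  apply Zsqrtd.ext <;> simp [Iu, pow_two]

theorem Iu_pow (i : Nat) :
    Iu ^ i = if i % 4 = 0 then 1 else if i % 4 = 1 then Iu
      else if i % 4 = 2 then -1 else -Iu := by
  have h4 : Iu ^ 4 = 1 := by
    rw [show (4 : Nat) = 2 * 2 from rfl, pow_mul, Iu_sq]
    ring
  have hi : i = 4 * (i / 4) + i % 4 := by omega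
  rw [hi, pow_add, pow_mul, h4, one_pow, one_mul]
  have : i % 4 = 0 ∨ i % 4 = 1 ∨ i % 4 = 2 ∨ i % 4 = 3 := by omega
  rcases this with h | h | h | h <;> simp [h]
  · rw [show (2 : Nat) = 2 * 1 from rfl, pow_mul, Iu_sq]
    ring
  · rw [show (3 : Nat) = 2 + 1 from rfl, pow_add, Iu_sq]
    ring

def TiG (n : Nat) (x y : Int) (i : Nat) : Zsqrtd (-1) :=
  ((n.choose i : Int) : Zsqrtd (-1)) * ((x : Zsqrtd (-1)) ^ (n - i)) * (((y : Zsqrtd (-1)) * Iu) ^ i)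

def SG (n : Nat) (x y : Int) (m : Nat) : Zsqrtd (-1) := ∑ i ∈ Finset.range m, TiG n x y i

theorem TiG_eval (n : Nat) (x y : Int) (i : Nat) :
    TiG n x y i = ((((n.choose i : Int) * x ^ (n - i) * y ^ i : Int)) : Zsqrtd (-1)) * Iu ^ i := by
  unfold TiG
  rw [mul_pow]
  push_cast
  ring

theorem re_cast_Iu (a : Int) (i : Nat) :
    ((a : Zsqrtd (-1)) * Iu ^ i).re
      = if i % 4 = 0 then a else if i % 4 = 2 then -a else 0 := by
  rw [Iu_pow]
  have : i % 4 = 0 ∨ i % 4 = 1 ∨ i % 4 = 2 ∨ i % 4 = 3 := by omega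
  rcases this with h | h | h | h <;> simp [h, Iu]

theorem im_cast_Iu (a : Int) (i : Nat) :
    ((a : Zsqrtd (-1)) * Iu ^ i).im
      = if i % 4 = 1 then a else if i % 4 = 3 then -a else 0 := by
  rw [Iu_pow]
  have : i % 4 = 0 ∨ i % 4 = 1 ∨ i % 4 = 2 ∨ i % 4 = 3 := by omega
  rcases this with h | h | h | h <;> simp [h, Iu]

theorem foldA (n : Nat) (x y : Int) (m : Nat) (hm : m ≤ n + 1) (s : Int × Int) :
    (PySem.List.pyRange 0 (m : Int) 1).foldl (fun (s : Int × Int) i =>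
      let s := if PySem.Int.mod i 4 = 0 then
        (s.1 + ncrPort (n : Int) i * x ^ ((n : Int) - i).toNat * y ^ i.toNat, s.2) else s
      let s := if PySem.Int.mod i 4 = 1 then
        (s.1, s.2 + ncrPort (n : Int) i * x ^ ((n : Int) - i).toNat * y ^ i.toNat) else s
      let s := if PySem.Int.mod i 4 = 2 then
        (s.1 + -(ncrPort (n : Int) i) * x ^ ((n : Int) - i).toNat * y ^ i.toNat, s.2) else s
      let s := if PySem.Int.mod i 4 = 3 then
        (s.1, s.2 + -(ncrPort (n : Int) i) * x ^ ((n : Int) - i).toNat * y ^ i.toNat) else s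
      s) s
    = (s.1 + (SG n x y m).re, s.2 + (SG n x y m).im) := by
  induction m with
  | zero =>
    rw [show ((0 : Nat) : Int) = 0 from rfl, PySem.List.pyRange_one_eq_nil (by omega)]
    simp [SG]
  | succ m ih =>
    have hm' : m ≤ n + 1 := by omega
    have hmn : m ≤ n := by omega
    rw [show ((m + 1 : Nat) : Int) = (m : Int) + 1 from by push_cast; ring,
      PySem.List.pyRange_one_succ_right (by omega), List.foldl_append, ih hm']
    have hmod : PySem.Int.mod (m : Int) 4 = ((m % 4 : Nat) : Int) := by
      simp [PySem.Int.mod, Int.fmod_eq_emod]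
    have hsum : SG n x y (m + 1) = SG n x y m + TiG n x y m := Finset.sum_range_succ _ _
    have ht : ncrPort (n : Int) (m : Int) * x ^ ((n : Int) - (m : Int)).toNat * y ^ ((m : Int)).toNat
        = (n.choose m : Int) * x ^ (n - m) * y ^ m := by
      rw [ncrPort_eq n m hmn, show ((n : Int) - (m : Int)).toNat = n - m from by omega,
        show ((m : Int)).toNat = m from by omega]
    have hre : (TiG n x y m).re
        = if m % 4 = 0 then (n.choose m : Int) * x ^ (n - m) * y ^ m
          else if m % 4 = 2 then -((n.choose m : Int) * x ^ (n - m) * y ^ m) else 0 := by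
      rw [TiG_eval, re_cast_Iu]
    have him : (TiG n x y m).im
        = if m % 4 = 1 then (n.choose m : Int) * x ^ (n - m) * y ^ m
          else if m % 4 = 3 then -((n.choose m : Int) * x ^ (n - m) * y ^ m) else 0 := by
      rw [TiG_eval, im_cast_Iu]
    simp only [List.foldl_cons, List.foldl_nil]
    rw [hmod, ht, hsum]
    simp only [Zsqrtd.re_add, Zsqrtd.im_add, hre, him]
    rcases (show m % 4 = 0 ∨ m % 4 = 1 ∨ m % 4 = 2 ∨ m % 4 = 3 from by omega) with h | h | h | h <;>
      norm_num [h, Prod.ext_iff, ncrPort_eq n m hmn] <;> try ring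


theorem SG_full (n : Nat) (x y : Int) :
    SG n x y (n + 1) = (⟨x, y⟩ : Zsqrtd (-1)) ^ n := by
  have hz : (⟨x, y⟩ : Zsqrtd (-1)) = (y : Zsqrtd (-1)) * Iu + (x : Zsqrtd (-1)) := by
    apply Zsqrtd.ext <;> simp [Iu]
  rw [hz, add_pow]
  unfold SG TiG
  apply Finset.sum_congr rfl
  intro i _
  push_cast
  ring

-- ===== VERDICT (by name: the statement is the Claim_ definition above) =====
theorem complexPower_spec : Claim_equal_complexPower := by
  intro c power _dom _pre
  unfold Spec_complexPower complexPower complexPower_alt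
  dsimp only
  by_cases hp : power < 0
  · rw [if_pos hp, PySem.List.pyRange_one_eq_nil (by omega)]
    simp
  · rw [if_neg hp]
    obtain ⟨n, rfl⟩ : ∃ n : Nat, power = (n : Int) := ⟨power.toNat, by omega⟩
    have hrange : (0 : Int) + 1 + (n : Int) = ((n + 1 : Nat) : Int) := by push_cast; ring
    have hA := foldA n (PySem.List.pyGetD c 0 0) (PySem.List.pyGetD c 1 0) (n + 1) (le_refl _) (0, 0)
    have hB := powLoopAlt_eq n (1, 0) (PySem.List.pyGetD c 0 0, PySem.List.pyGetD c 1 0)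
    have h1 : toG (1, 0) = 1 := by apply Zsqrtd.ext <;> simp [toG]
    rw [h1, one_mul] at hB
    rw [show ((n : Int) + 1) = ((n + 1 : Nat) : Int) from by push_cast; ring, hA, SG_full]
    rw [show ((n : Int)).toNat = n from by omega]
    have hre := congrArg Zsqrtd.re hB
    have him := congrArg Zsqrtd.im hB
    have hbase : toG (PySem.List.pyGetD c 0 0, PySem.List.pyGetD c 1 0)
        = (⟨PySem.List.pyGetD c 0 0, PySem.List.pyGetD c 1 0⟩ : Zsqrtd (-1)) := rfl
    rw [hbase] at hre him
    simp only [toG] at hre him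
    rw [zero_add, zero_add, ← hre, ← him]
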